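-- pv_equiv track=rewrite | github.com/KakaoFarm/Youngkwon-Algorithm | Baekjoon/2304-창고다각형.py | is_roof
-- ===== SOURCE A (Python) =====
-- def is_roof(L, H, pillars):
--     left = True; right = True
--     for (x, y) in pillars:
--         if y > H:
--             if L > x:
--                 left = False
--             else:
--                 right = False
--         if not left and not right:
--             return False
--     return True
-- ===== SOURCE B (Python) =====
-- def is_roof(L, H, pillars):
--     left_max = max((y for (x, y) in pillars if L > x), default=H)
--     right_max = max((y for (x, y) in pillars if not (L > x)), default=H)
--     return not (left_max > H and right_max > H)
-- ===== Notes on version B (the rewrite author's own statement) =====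
-- stated objective: simpler
-- what changed: Replaces the interleaved flag-tracking loop with early return by two filtered max reductions (max pillar height on each side of L, default H) and one final comparison.
import Mathlib
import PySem

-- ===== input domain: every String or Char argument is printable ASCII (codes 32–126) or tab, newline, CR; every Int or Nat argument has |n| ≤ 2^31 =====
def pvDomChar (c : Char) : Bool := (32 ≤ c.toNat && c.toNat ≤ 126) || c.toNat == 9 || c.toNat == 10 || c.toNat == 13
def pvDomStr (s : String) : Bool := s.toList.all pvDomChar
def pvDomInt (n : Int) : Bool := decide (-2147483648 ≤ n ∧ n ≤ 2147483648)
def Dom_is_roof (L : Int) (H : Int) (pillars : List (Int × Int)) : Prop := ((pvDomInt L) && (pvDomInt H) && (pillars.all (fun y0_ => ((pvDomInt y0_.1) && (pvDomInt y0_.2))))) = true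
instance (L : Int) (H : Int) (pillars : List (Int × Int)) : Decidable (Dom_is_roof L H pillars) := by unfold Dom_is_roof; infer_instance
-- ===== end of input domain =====

-- B replaces A's interleaved flag loop (with early return) by two filtered per-side
-- max reductions compared against H once; same O(n) cost, simpler decomposition.

-- ===== PORT A =====
-- the for-loop over pillars carrying the two flags, with the early `return False`
def is_roof_loop (L : Int) (H : Int) : List (Int × Int) → Bool → Bool → Bool
  | [], _, _ => true
  | (x, y) :: rest, left, right =>
    let left' := if decide (y > H) && decide (L > x) then false else left
    let right' := if decide (y > H) && !decide (L > x) then false else right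
    if !left' && !right' then false else is_roof_loop L H rest left' right'

def is_roof (L : Int) (H : Int) (pillars : List (Int × Int)) : Bool :=
  is_roof_loop L H pillars true true

-- ===== PORT B =====
-- max(gen, default=H): first extremal via PySem.List.max?, default H on the empty side
def pvMaxD (H : Int) (ys : List Int) : Int :=
  match PySem.List.max? ys (fun y => y) with
  | none => H
  | some m => m

def is_roof_alt (L : Int) (H : Int) (pillars : List (Int × Int)) : Bool :=
  let leftMax := pvMaxD H ((pillars.filter (fun p => decide (L > p.1))).map (·.2))
  let rightMax := pvMaxD H ((pillars.filter (fun p => !decide (L > p.1))).map (·.2))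
  !(decide (leftMax > H) && decide (rightMax > H))

-- ===== PRECONDITION & SPEC =====
def Spec_is_roof (L : Int) (H : Int) (pillars : List (Int × Int)) (out : Bool) : Prop := out = is_roof_alt L H pillars
instance (L : Int) (H : Int) (pillars : List (Int × Int)) (out : Bool) : Decidable (Spec_is_roof L H pillars out) := by unfold Spec_is_roof; infer_instance

-- ===== CLAIM (what is proved, stated in full; the proofs are below) =====
def Claim_equal_is_roof : Prop := ∀ (L : Int) (H : Int) (pillars : List (Int × Int)), Dom_is_roof L H pillars → Spec_is_roof L H pillars (is_roof L H pillars)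

-- ===== LEMMAS AND PROOFS =====

-- 'there is a taller pillar strictly left of L' / 'at or right of L'
def hasTallLeft (L : Int) (H : Int) (ps : List (Int × Int)) : Bool :=
  ps.any (fun p => decide (p.2 > H) && decide (L > p.1))

def hasTallRight (L : Int) (H : Int) (ps : List (Int × Int)) : Bool :=
  ps.any (fun p => decide (p.2 > H) && !decide (L > p.1))

theorem is_roof_loop_eq (L H : Int) (ps : List (Int × Int)) :
    ∀ (l r : Bool), (l || r) = true →
      is_roof_loop L H ps l r =
        !((!l || hasTallLeft L H ps) && (!r || hasTallRight L H ps)) := by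
  induction ps with
  | nil =>
    intro l r h
    simp [is_roof_loop, hasTallLeft, hasTallRight]
    cases l <;> cases r <;> simp_all
  | cons p rest ih =>
    intro l r h
    obtain ⟨x, y⟩ := p
    simp only [is_roof_loop, hasTallLeft, hasTallRight, List.any_cons]
    cases hy : decide (y > H) <;> cases hx : decide (L > x) <;>
      cases l <;> cases r <;>
        simp_all [hasTallLeft, hasTallRight]

theorem pvMaxD_gt (H : Int) (ys : List Int) :
    decide (pvMaxD H ys > H) = ys.any (fun y => decide (y > H)) := by
  cases ys with
  | nil => simp [pvMaxD, PySem.List.max?]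
  | cons a t =>
    simp only [pvMaxD, PySem.List.max?_id_cons]
    induction t generalizing a with
    | nil => simp
    | cons b t ih =>
      rw [List.foldl_cons, ih (max a b)]
      simp [List.any_cons, Bool.or_assoc]

theorem any_filter_map (q : Int → Bool) (f : Int × Int → Bool) (ps : List (Int × Int)) :
    (((ps.filter f).map (·.2)).any q) = ps.any (fun p => f p && q p.2) := by
  induction ps with
  | nil => rfl
  | cons p rest ih =>
    by_cases h : f p <;> simp [h, ih]


-- ===== VERDICT (by name: the statement is the Claim_ definition above) =====
theorem is_roof_spec : Claim_equal_is_roof := by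
  intro L H pillars _
  unfold Spec_is_roof is_roof
  simp only [is_roof_alt]
  rw [is_roof_loop_eq L H pillars true true rfl]
  simp only [Bool.not_true, Bool.false_or]
  have hl := pvMaxD_gt H ((pillars.filter (fun p => decide (L > p.1))).map (·.2))
  have hr := pvMaxD_gt H ((pillars.filter (fun p => !decide (L > p.1))).map (·.2))
  rw [any_filter_map] at hl
  rw [any_filter_map] at hr
  rw [hl, hr]
  simp [hasTallLeft, hasTallRight, Bool.and_comm]
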